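-- pv_equiv track=rewrite | github.com/MrBrantCode/unitest_baseline | mut_generate/mist_train_cf/cf_79696/solution.py | locate_numbers
-- ===== SOURCE A (Python) =====
-- def is_prime(n):
-- 	if n < 2:
-- 		return False
-- 	for i in range(2, int(n**0.5) + 1):
-- 		if n % i == 0:
-- 			return False
-- 	return True
--
-- def is_composite(n):
-- 	if n < 2:
-- 		return False
-- 	for i in range(2, n):
-- 		if n % i == 0:
-- 			return True
-- 	return False
--
-- def locate_numbers(lst):
-- 	if not lst:
-- 		return (None, None, None, None, None, None)
--
-- 	primes = []
-- 	composites = []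
--
-- 	for n in lst:
-- 		if is_prime(n):
-- 			primes.append(n)
-- 		elif is_composite(n):
-- 			composites.append(n)
--
-- 	a = min(primes) if primes else None
-- 	b = max(primes) if primes else None
-- 	c = min(composites) if composites else None
-- 	d = max(composites) if composites else None
-- 	e = sum(primes) if primes else None
-- 	f = sum(composites) if composites else None
--
-- 	return (a, b, c, d, e, f)
-- ===== SOURCE B (Python) =====
-- def is_prime(n):
-- 	if n < 2:
-- 		return False
-- 	for i in range(2, int(n**0.5) + 1):
-- 		if n % i == 0:
-- 			return False
-- 	return True
--
-- def is_composite(n):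
-- 	if n < 2:
-- 		return False
-- 	for i in range(2, n):
-- 		if n % i == 0:
-- 			return True
-- 	return False
--
-- def locate_numbers(lst):
-- 	pmin = pmax = psum = None
-- 	cmin = cmax = csum = None
-- 	for n in lst:
-- 		if is_prime(n):
-- 			if psum is None:
-- 				pmin = pmax = psum = n
-- 			else:
-- 				if n < pmin:
-- 					pmin = n
-- 				if n > pmax:
-- 					pmax = n
-- 				psum += n
-- 		elif is_composite(n):
-- 			if csum is None:
-- 				cmin = cmax = csum = n
-- 			else:
-- 				if n < cmin:
-- 					cmin = n
-- 				if n > cmax: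
-- 					cmax = n
-- 				csum += n
-- 	return (pmin, pmax, cmin, cmax, psum, csum)
-- ===== Notes on version B (the rewrite author's own statement) =====
-- stated objective: alternative
-- what changed: Instead of building the prime and composite lists and then running min/max/sum over each, B makes one pass over lst maintaining six None-initialised running accumulators (prime min/max/sum, composite min/max/sum), needing no intermediate lists and no empty-list guard.
import Mathlib
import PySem

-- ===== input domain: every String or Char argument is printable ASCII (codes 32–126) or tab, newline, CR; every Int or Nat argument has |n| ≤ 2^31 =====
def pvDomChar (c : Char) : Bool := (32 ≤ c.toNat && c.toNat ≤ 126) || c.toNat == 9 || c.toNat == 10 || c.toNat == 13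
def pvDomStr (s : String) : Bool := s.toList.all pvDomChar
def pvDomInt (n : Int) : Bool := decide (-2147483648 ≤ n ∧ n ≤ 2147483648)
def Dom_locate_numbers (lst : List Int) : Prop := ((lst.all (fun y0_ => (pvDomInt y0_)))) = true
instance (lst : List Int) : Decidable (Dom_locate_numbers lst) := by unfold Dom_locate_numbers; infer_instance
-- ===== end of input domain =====

-- B replaces A's two intermediate lists + min/max/sum passes by one pass over lst with six
-- running accumulators (objective: alternative decomposition, same asymptotic cost).

-- ===== PORT A =====
-- shared helpers: Source A and Source B contain the identical is_prime / is_composite code.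
-- int(n**0.5) is ported as Nat.sqrt: exact for 0 ≤ n ≤ 2^31 (double sqrt rounds to isqrt there).
-- each 'for … return' loop is ported as a structural recursion with the same early exit.
def primeLoop (n : Int) (i : Int) (fuel : Nat) : Bool :=
  match fuel with
  | 0 => true
  | fuel + 1 =>
    if PySem.Int.mod n i == 0 then false else primeLoop n (i + 1) fuel

def is_prime (n : Int) : Bool :=
  if n < 2 then false
  else primeLoop n 2 ((Int.ofNat (Nat.sqrt n.toNat) + 1) - 2).toNat

def compLoop (n : Int) (i : Int) (fuel : Nat) : Bool :=
  match fuel with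
  | 0 => false
  | fuel + 1 =>
    if PySem.Int.mod n i == 0 then true else compLoop n (i + 1) fuel

def is_composite (n : Int) : Bool :=
  if n < 2 then false
  else compLoop n 2 (n - 2).toNat

def locate_numbers (lst : List Int) : List (Option Int) :=
  if lst = [] then [none, none, none, none, none, none]
  else
    let pc := lst.foldl
      (fun (s : List Int × List Int) n =>
        if is_prime n then (s.1 ++ [n], s.2)
        else if is_composite n then (s.1, s.2 ++ [n])
        else s) ([], [])
    let primes := pc.1
    let composites := pc.2
    let a := if primes = [] then none else PySem.List.min? primes (fun x => x)
    let b := if primes = [] then none else PySem.List.max? primes (fun x => x)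
    let c := if composites = [] then none else PySem.List.min? composites (fun x => x)
    let d := if composites = [] then none else PySem.List.max? composites (fun x => x)
    let e := if primes = [] then none else some primes.sum
    let f := if composites = [] then none else some composites.sum
    [a, b, c, d, e, f]

-- ===== PORT B =====
-- a category's accumulators (min, max, sum); all none until the first member is seen
def updCat (c : Option Int × Option Int × Option Int) (n : Int) :
    Option Int × Option Int × Option Int :=
  match c with
  | (mn, mx, sm) =>
    match sm with
    | none => (some n, some n, some n)
    | some s =>
      let mn' := match mn with
        | none => some n
        | some m => if n < m then some n else some m
      let mx' := match mx with
        | none => some n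
        | some m => if n > m then some n else some m
      (mn', mx', some (s + n))

def locate_numbers_alt (lst : List Int) : List (Option Int) :=
  let st := lst.foldl
    (fun (s : (Option Int × Option Int × Option Int) × (Option Int × Option Int × Option Int)) n =>
      if is_prime n then (updCat s.1 n, s.2)
      else if is_composite n then (s.1, updCat s.2 n)
      else s)
    ((none, none, none), (none, none, none))
  [st.1.1, st.1.2.1, st.2.1, st.2.2.1, st.1.2.2, st.2.2.2]

-- ===== PRECONDITION & SPEC =====
def Spec_locate_numbers (lst : List Int) (out : List (Option Int)) : Prop := out = locate_numbers_alt lst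
instance (lst : List Int) (out : List (Option Int)) : Decidable (Spec_locate_numbers lst out) := by unfold Spec_locate_numbers; infer_instance

-- ===== CLAIM (what is proved, stated in full; the proofs are below) =====
def Claim_equal_locate_numbers : Prop := ∀ (lst : List Int), Dom_locate_numbers lst → Spec_locate_numbers lst (locate_numbers lst)

-- ===== LEMMAS AND PROOFS =====

-- the aggregates A computes from a category list, as one triple
def agg (l : List Int) : Option Int × Option Int × Option Int :=
  (PySem.List.min? l (fun x => x), PySem.List.max? l (fun x => x),
   if l = [] then none else some l.sum)

theorem updCat_agg (l : List Int) (n : Int) : updCat (agg l) n = agg (l ++ [n]) := by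
  cases l with
  | nil => simp [agg, updCat, PySem.List.min?, PySem.List.max?]
  | cons x t =>
    simp only [agg, updCat, PySem.List.min?_id_cons, PySem.List.max?_id_cons,
      List.cons_append, List.foldl_append, List.foldl_cons, List.foldl_nil,
      List.cons_ne_nil, List.sum_cons, List.sum_append, List.sum_nil]
    refine Prod.ext ?_ (Prod.ext ?_ ?_) <;> simp [min_def, max_def]
    · split_ifs <;> simp <;> omega
    · split_ifs <;> simp <;> omega
    · ring

theorem fold_agg (lst : List Int) (ps cs : List Int) :
    lst.foldl
      (fun (s : (Option Int × Option Int × Option Int) × (Option Int × Option Int × Option Int)) n =>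
        if is_prime n then (updCat s.1 n, s.2)
        else if is_composite n then (s.1, updCat s.2 n)
        else s)
      (agg ps, agg cs)
    = (agg (lst.foldl
        (fun (s : List Int × List Int) n =>
          if is_prime n then (s.1 ++ [n], s.2)
          else if is_composite n then (s.1, s.2 ++ [n])
          else s) (ps, cs)).1,
       agg (lst.foldl
        (fun (s : List Int × List Int) n =>
          if is_prime n then (s.1 ++ [n], s.2)
          else if is_composite n then (s.1, s.2 ++ [n])
          else s) (ps, cs)).2) := by
  induction lst generalizing ps cs with
  | nil => simp
  | cons n t ih =>
    simp only [List.foldl_cons]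
    by_cases hp : is_prime n
    · simpa [hp, updCat_agg] using ih (ps ++ [n]) cs
    · by_cases hc : is_composite n
      · simpa [hp, hc, updCat_agg] using ih ps (cs ++ [n])
      · simpa [hp, hc] using ih ps cs

theorem guard_min (l : List Int) :
    (if l = [] then none else PySem.List.min? l (fun x => x)) = PySem.List.min? l (fun x => x) := by
  split_ifs with h
  · simp [h, PySem.List.min?]
  · rfl

theorem guard_max (l : List Int) :
    (if l = [] then none else PySem.List.max? l (fun x => x)) = PySem.List.max? l (fun x => x) := by
  split_ifs with h
  · simp [h, PySem.List.max?]
  · rfl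

-- ===== VERDICT (by name: the statement is the Claim_ definition above) =====
theorem locate_numbers_spec : Claim_equal_locate_numbers := by
  intro lst _
  unfold Spec_locate_numbers locate_numbers locate_numbers_alt
  split_ifs with h
  · subst h; rfl
  · have hfold := fold_agg lst [] []
    have h0 : agg [] = (none, none, none) := by
      simp [agg, PySem.List.min?, PySem.List.max?]
    rw [h0] at hfold
    simp only [hfold, agg, guard_min, guard_max]
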